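-- pv_equiv track=rewrite | github.com/jiadaizhao/LintCode | 1301-1400/1326-Boarder Sort/1326-Boarder Sort.py | BoarderSort
-- ===== SOURCE A (Python) =====
-- def BoarderSort(grids):
--     # write your code here
--     n = len(grids)
--     rowStart = colStart = 0
--     rowEnd = colEnd = n - 1
--     while rowStart <= rowEnd and colStart <= colEnd:
--         indices = []
--         temp = []
--         for j in range(colStart, colEnd + 1):
--             indices.append([rowStart, j])
--             temp.append(grids[rowStart][j])
--         rowStart += 1
--         for i in range(rowStart, rowEnd + 1):
--             indices.append([i, colEnd])
--             temp.append(grids[i][colEnd])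
--         colEnd -= 1
--         if rowStart <= rowEnd:
--             for j in range(colEnd, colStart - 1, -1):
--                 indices.append([rowEnd, j])
--                 temp.append(grids[rowEnd][j])
--             rowEnd -= 1
--
--         if colStart <= colEnd:
--             for i in range(rowEnd, rowStart - 1, -1):
--                 indices.append([i, colStart])
--                 temp.append(grids[i][colStart])
--             colStart += 1
--
--         for (i, j), val in zip(indices, sorted(temp)):
--             grids[i][j] = val
--
--     return grids
-- ===== SOURCE B (Python) =====
-- def BoarderSort(grids):
--     # Bucket every cell by its ring index and spiral rank in one pass,
--     # then sort each ring's values and write them back in rank order.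
--     n = len(grids)
--     buckets = [[] for _ in range((n + 1) // 2)]
--     for i in range(n):
--         for j in range(n):
--             l = min(i, j, n - 1 - i, n - 1 - j)
--             s = n - 1 - 2 * l
--             if i == l:
--                 r = j - l
--             elif j == n - 1 - l:
--                 r = s + i - l
--             elif i == n - 1 - l:
--                 r = 2 * s + (n - 1 - l - j)
--             else:
--                 r = 3 * s + (n - 1 - l - i)
--             buckets[l].append((r, i, j))
--     for cells in buckets:
--         cells.sort(key=lambda c: c[0])
--         vals = sorted(grids[i][j] for (_, i, j) in cells)
--         for (_, i, j), v in zip(cells, vals):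
--             grids[i][j] = v
--     return grids
-- ===== Notes on version B (the rewrite author's own statement) =====
-- stated objective: alternative
-- what changed: Replaces A's while-loop that peels rings by mutating four boundary cursors with one pass over all cells computing each cell's ring index min(i,j,n-1-i,n-1-j) and a closed-form spiral rank, bucketing cells per ring, then sorting each bucket by rank and writing the ring's sorted values back.
import Mathlib
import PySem

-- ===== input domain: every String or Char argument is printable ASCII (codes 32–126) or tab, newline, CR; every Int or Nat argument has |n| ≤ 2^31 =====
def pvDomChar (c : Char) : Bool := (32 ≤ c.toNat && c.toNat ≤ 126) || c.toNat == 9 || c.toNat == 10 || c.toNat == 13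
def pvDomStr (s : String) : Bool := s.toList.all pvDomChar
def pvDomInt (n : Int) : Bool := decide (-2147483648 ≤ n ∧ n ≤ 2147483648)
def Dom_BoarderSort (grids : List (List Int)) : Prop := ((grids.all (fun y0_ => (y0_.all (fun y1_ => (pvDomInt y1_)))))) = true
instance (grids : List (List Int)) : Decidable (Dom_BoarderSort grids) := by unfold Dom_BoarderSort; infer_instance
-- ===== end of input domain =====

-- B buckets cells by ring index with a closed-form spiral rank instead of A's cursor-peeling
-- while loop; equivalence is about the RETURN value (both Pythons also mutate `grids` in place).

-- shared 2-d read/write primitives (Python grids[i][j] read / assignment; indices are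
-- always non-negative and in range in both programs, the defaults are never used)
def pvGet2 (g : List (List Int)) (i j : Int) : Int :=
  PySem.List.pyGetD (PySem.List.pyGetD g i []) j 0

def pvSet2 (g : List (List Int)) (i j v : Int) : List (List Int) :=
  g.set i.toNat ((PySem.List.pyGetD g i []).set j.toNat v)

-- ===== PORT A =====
def pvLoopA (g : List (List Int)) (rs re cs ce : Int) : List (List Int) :=
  if _h : rs ≤ re ∧ cs ≤ ce then
    let acc1 := (PySem.List.pyRange cs (ce + 1) 1).foldl
      (fun (p : List (Int × Int) × List Int) j => (p.1 ++ [(rs, j)], p.2 ++ [pvGet2 g rs j])) ([], [])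
    let rs1 := rs + 1
    let acc2 := (PySem.List.pyRange rs1 (re + 1) 1).foldl
      (fun p i => (p.1 ++ [(i, ce)], p.2 ++ [pvGet2 g i ce])) acc1
    let ce1 := ce - 1
    let acc3 := if rs1 ≤ re then
        (PySem.List.pyRange ce1 (cs - 1) (-1)).foldl
          (fun p j => (p.1 ++ [(re, j)], p.2 ++ [pvGet2 g re j])) acc2
      else acc2
    let re1 := if rs1 ≤ re then re - 1 else re
    let acc4 := if cs ≤ ce1 then
        (PySem.List.pyRange re1 (rs1 - 1) (-1)).foldl
          (fun p i => (p.1 ++ [(i, cs)], p.2 ++ [pvGet2 g i cs])) acc3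
      else acc3
    let cs1 := if cs ≤ ce1 then cs + 1 else cs
    let g' := (acc4.1.zip (PySem.List.sorted acc4.2 (fun x => x) false)).foldl
      (fun g pv => pvSet2 g pv.1.1 pv.1.2 pv.2) g
    pvLoopA g' rs1 re1 cs1 ce1
  else g
termination_by (re + 1 - rs).toNat
decreasing_by
  split_ifs <;> omega

def BoarderSort (grids : List (List Int)) : List (List Int) :=
  pvLoopA grids 0 ((grids.length : Int) - 1) 0 ((grids.length : Int) - 1)

-- ===== PORT B =====
def pvLayer (n i j : Int) : Int := min (min i j) (min (n - 1 - i) (n - 1 - j))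

def pvRank (n l i j : Int) : Int :=
  let s := n - 1 - 2 * l
  if i = l then j - l
  else if j = n - 1 - l then s + i - l
  else if i = n - 1 - l then 2 * s + (n - 1 - l - j)
  else 3 * s + (n - 1 - l - i)

def BoarderSort_alt (grids : List (List Int)) : List (List Int) :=
  let n : Int := grids.length
  let buckets0 : List (List (Int × Int × Int)) :=
    (PySem.List.pyRange 0 (PySem.Int.floordiv (n + 1) 2) 1).map (fun _ => [])
  let buckets := (PySem.List.pyRange 0 n 1).foldl (fun bs i =>
      (PySem.List.pyRange 0 n 1).foldl (fun bs j =>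
        let l := pvLayer n i j
        bs.set l.toNat (PySem.List.pyGetD bs l [] ++ [(pvRank n l i j, i, j)])) bs) buckets0
  buckets.foldl (fun g cells =>
    let cells' := PySem.List.sorted cells (fun c => c.1) false
    let vals := PySem.List.sorted (cells'.map (fun c => pvGet2 g c.2.1 c.2.2)) (fun x => x) false
    (cells'.zip vals).foldl (fun g cv => pvSet2 g cv.1.2.1 cv.1.2.2 cv.2) g) grids

-- ===== PRECONDITION & SPEC =====
-- Pre_: every row at least as long as the number of rows — exactly where Python A
-- returns normally (a shorter row makes grids[i][j] raise IndexError).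
def Pre_BoarderSort (grids : List (List Int)) : Prop :=
  ∀ row ∈ grids, grids.length ≤ row.length
instance (grids : List (List Int)) : Decidable (Pre_BoarderSort grids) := by
  unfold Pre_BoarderSort; infer_instance

def pvWitness_BoarderSort : List (List Int) := [[3, 1], [4, 2]]

def Spec_BoarderSort (grids : List (List Int)) (out : List (List Int)) : Prop := out = BoarderSort_alt grids
instance (grids : List (List Int)) (out : List (List Int)) : Decidable (Spec_BoarderSort grids out) := by unfold Spec_BoarderSort; infer_instance

-- ===== CLAIM (what is proved, stated in full; the proofs are below) =====
def Claim_equal_BoarderSort : Prop := ∀ (grids : List (List Int)), Dom_BoarderSort grids → Pre_BoarderSort grids → Spec_BoarderSort grids (BoarderSort grids)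

-- ===== LEMMAS AND PROOFS =====

-- spiral coordinates of ring l of an n×n grid, in A's traversal order
def ringCoords (n l : Int) : List (Int × Int) :=
  (PySem.List.pyRange l (n - l) 1).map (fun j => (l, j))
  ++ (PySem.List.pyRange (l + 1) (n - l) 1).map (fun i => (i, n - 1 - l))
  ++ (if l + 1 ≤ n - 1 - l then
        (PySem.List.pyRange (n - 2 - l) (l - 1) (-1)).map (fun j => (n - 1 - l, j)) else [])
  ++ (if l + 1 ≤ n - 1 - l then
        (PySem.List.pyRange (n - 2 - l) l (-1)).map (fun i => (i, l)) else [])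

-- the same ring as rank-tagged cells, carrying B's closed-form ranks
def spiralCells (n l : Int) : List (Int × Int × Int) :=
  (PySem.List.pyRange l (n - l) 1).map (fun j => (j - l, l, j))
  ++ (PySem.List.pyRange (l + 1) (n - l) 1).map (fun i => ((n - 1 - 2 * l) + i - l, i, n - 1 - l))
  ++ (if l + 1 ≤ n - 1 - l then
        (PySem.List.pyRange (n - 2 - l) (l - 1) (-1)).map
          (fun j => (2 * (n - 1 - 2 * l) + (n - 1 - l - j), n - 1 - l, j)) else [])
  ++ (if l + 1 ≤ n - 1 - l then
        (PySem.List.pyRange (n - 2 - l) l (-1)).map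
          (fun i => (3 * (n - 1 - 2 * l) + (n - 1 - l - i), i, l)) else [])

-- ring-l cells of the grid in row-major order, as B's single pass buckets them
def rowMajorCells (n l : Int) : List (Int × Int × Int) :=
  (PySem.List.pyRange 0 n 1).flatMap (fun i =>
    ((PySem.List.pyRange 0 n 1).filter (fun j => pvLayer n i j = l)).map
      (fun j => (pvRank n l i j, i, j)))

-- read the ring's values, sort them, write them back along the ring
def stepRing (g : List (List Int)) (c : List (Int × Int)) : List (List Int) :=
  ((c.zip (PySem.List.sorted (c.map (fun p => pvGet2 g p.1 p.2)) (fun x => x) false)).foldl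
    (fun g pv => pvSet2 g pv.1.1 pv.1.2 pv.2) g)

def applyRings (g : List (List Int)) (n l : Int) : List (List Int) :=
  if l ≤ n - 1 - l then applyRings (stepRing g (ringCoords n l)) n (l + 1) else g
termination_by (n - 2 * l).toNat
decreasing_by omega

def cellCond (n l : Int) (c : Int × Int × Int) : Prop :=
  0 ≤ c.2.1 ∧ c.2.1 < n ∧ 0 ≤ c.2.2 ∧ c.2.2 < n ∧
    pvLayer n c.2.1 c.2.2 = l ∧ c.1 = pvRank n l c.2.1 c.2.2

theorem mem_spiralCells (n l : Int) (h0 : 0 ≤ l) (h1 : 2 * l ≤ n - 1) (c : Int × Int × Int) :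
    c ∈ spiralCells n l ↔ cellCond n l c := by
  obtain ⟨r, i, j⟩ := c
  by_cases hc : l + 1 ≤ n - 1 - l
  · simp only [spiralCells, hc, if_true, List.mem_append, List.mem_map,
      PySem.List.mem_pyRange_one, PySem.List.mem_pyRange_neg_one,
      cellCond, pvLayer, pvRank, Prod.mk.injEq]
    constructor
    · rintro (((⟨x, ⟨ha, hb⟩, hr, hi, hj⟩ | ⟨x, ⟨ha, hb⟩, hr, hi, hj⟩) |
          ⟨x, ⟨ha, hb⟩, hr, hi, hj⟩) | ⟨x, ⟨ha, hb⟩, hr, hi, hj⟩) <;>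
        · subst hi hj; refine ⟨by omega, by omega, by omega, by omega, by omega, ?_⟩
          split_ifs <;> omega
    · intro ⟨hi0, hin, hj0, hjn, hlay, hr⟩
      split_ifs at hr with e1 e2 e3
      · exact Or.inl (Or.inl (Or.inl ⟨j, ⟨by omega, by omega⟩, by omega, e1.symm, rfl⟩))
      · exact Or.inl (Or.inl (Or.inr ⟨i, ⟨by omega, by omega⟩, by omega, rfl, e2.symm⟩))
      · exact Or.inl (Or.inr ⟨j, ⟨by omega, by omega⟩, by omega, e3.symm, rfl⟩)
      · exact Or.inr ⟨i, ⟨by omega, by omega⟩, by omega, rfl, by omega⟩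
  · simp only [spiralCells, hc, if_false, List.mem_append, List.mem_map,
      List.not_mem_nil, or_false, PySem.List.mem_pyRange_one,
      cellCond, pvLayer, pvRank, Prod.mk.injEq]
    constructor
    · rintro (⟨x, ⟨ha, hb⟩, hr, hi, hj⟩ | ⟨x, ⟨ha, hb⟩, hr, hi, hj⟩) <;>
        · subst hi hj; refine ⟨by omega, by omega, by omega, by omega, by omega, ?_⟩
          split_ifs <;> omega
    · intro ⟨hi0, hin, hj0, hjn, hlay, hr⟩
      split_ifs at hr with e1 e2 e3
      · exact Or.inl ⟨j, ⟨by omega, by omega⟩, by omega, e1.symm, rfl⟩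
      · exact Or.inr ⟨i, ⟨by omega, by omega⟩, by omega, rfl, e2.symm⟩
      · exfalso; omega
      · exfalso; omega

theorem mem_rowMajorCells (n l : Int) (c : Int × Int × Int) :
    c ∈ rowMajorCells n l ↔ cellCond n l c := by
  obtain ⟨r, i, j⟩ := c
  simp only [rowMajorCells, List.mem_flatMap, List.mem_map, List.mem_filter,
    PySem.List.mem_pyRange_one, cellCond, Prod.mk.injEq, decide_eq_true_eq]
  constructor
  · rintro ⟨x, hx, y, ⟨hy, hyl⟩, hr, hi, hj⟩
    subst hi hj
    exact ⟨hx.1, hx.2, hy.1, hy.2, hyl, hr.symm⟩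
  · intro ⟨hi0, hin, hj0, hjn, hlay, hr⟩
    exact ⟨i, ⟨hi0, hin⟩, j, ⟨⟨hj0, hjn⟩, hlay⟩, hr.symm, rfl, rfl⟩

theorem nodup_rowMajorCells (n l : Int) : (rowMajorCells n l).Nodup := by
  rw [rowMajorCells, List.nodup_flatMap]
  constructor
  · intro i _
    refine List.Nodup.map ?_ (List.Nodup.filter _ (PySem.List.nodup_pyRange_one 0 n))
    intro a b hab
    exact congrArg (fun c => c.2.2) hab
  · refine List.Pairwise.imp ?_ (PySem.List.nodup_pyRange_one 0 n)
    intro a b hab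
    simp only [List.disjoint_left, List.mem_map]
    rintro c ⟨x, _, rfl⟩ ⟨y, _, h⟩
    exact hab (congrArg (fun c => c.2.1) h).symm

theorem pairwise_gt_pyRange_neg_one (a b : Int) :
    (PySem.List.pyRange a b (-1)).Pairwise (fun x y => y < x) := by
  rw [PySem.List.pyRange_neg_one_eq_reverse, List.pairwise_reverse]
  exact PySem.List.pairwise_lt_pyRange_one _ _

theorem pairwise_spiralCells (n l : Int) :
    (spiralCells n l).Pairwise (fun a b => a.1 < b.1) := by
  have memIf : ∀ (P : Prop) [Decidable P] (xs : List (Int × Int × Int)) c,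
      c ∈ (if P then xs else []) → P ∧ c ∈ xs := by
    intro P _ xs c hc
    split_ifs at hc with h
    · exact ⟨h, hc⟩
    · simp at hc
  rw [spiralCells]
  simp only [List.pairwise_append]
  refine ⟨⟨⟨?_, ?_, ?_⟩, ?_, ?_⟩, ?_, ?_⟩
  · rw [List.pairwise_map]
    exact (PySem.List.pairwise_lt_pyRange_one _ _).imp (fun h => by simpa using by omega)
  · rw [List.pairwise_map]
    exact (PySem.List.pairwise_lt_pyRange_one _ _).imp (fun h => by simpa using by omega)
  · -- top vs right
    intro a ha b hb
    simp only [List.mem_map, PySem.List.mem_pyRange_one] at ha hb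
    obtain ⟨x, hx, rfl⟩ := ha; obtain ⟨y, hy, rfl⟩ := hb
    simp only; omega
  · -- bottom pairwise
    split_ifs
    · rw [List.pairwise_map]
      exact (pairwise_gt_pyRange_neg_one _ _).imp (fun h => by simpa using by omega)
    · exact List.Pairwise.nil
  · -- top++right vs bottom
    intro a ha b hb
    obtain ⟨hcc, hb⟩ := memIf _ _ _ hb
    simp only [List.mem_map, PySem.List.mem_pyRange_neg_one] at hb
    obtain ⟨y, hy, rfl⟩ := hb
    rcases List.mem_append.mp ha with ha | ha <;>
      · simp only [List.mem_map, PySem.List.mem_pyRange_one] at ha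
        obtain ⟨x, hx, rfl⟩ := ha
        simp only; omega
  · -- left pairwise
    split_ifs
    · rw [List.pairwise_map]
      exact (pairwise_gt_pyRange_neg_one _ _).imp (fun h => by simpa using by omega)
    · exact List.Pairwise.nil
  · -- top++right++bottom vs left
    intro a ha b hb
    obtain ⟨hcc, hb⟩ := memIf _ _ _ hb
    simp only [List.mem_map, PySem.List.mem_pyRange_neg_one] at hb
    obtain ⟨y, hy, rfl⟩ := hb
    rcases List.mem_append.mp ha with ha | ha
    · rcases List.mem_append.mp ha with ha | ha <;>
        · simp only [List.mem_map, PySem.List.mem_pyRange_one] at ha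
          obtain ⟨x, hx, rfl⟩ := ha
          simp only; omega
    · obtain ⟨_, ha⟩ := memIf _ _ _ ha
      simp only [List.mem_map, PySem.List.mem_pyRange_neg_one] at ha
      obtain ⟨x, hx, rfl⟩ := ha
      simp only; omega

theorem foldl_pair_append {α β : Type} (f : Int → α) (h : Int → β) (xs : List Int) (a : List α) (b : List β) :
    xs.foldl (fun p x => (p.1 ++ [f x], p.2 ++ [h x])) (a, b) = (a ++ xs.map f, b ++ xs.map h) := by
  rw [PySem.List.foldl_prod_mk (fun s e => s ++ [f e]) (fun s e => s ++ [h e]) xs a b]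
  rw [PySem.List.foldl_append_singleton_eq_map, PySem.List.foldl_append_singleton_eq_map]

theorem loopA_aux : ∀ (k : Nat) (g : List (List Int)) (n l : Int), (n - 2 * l).toNat ≤ k →
    pvLoopA g l (n - 1 - l) l (n - 1 - l) = applyRings g n l := by
  intro k
  induction k with
  | zero =>
    intro g n l hk
    rw [pvLoopA, applyRings]
    have : ¬ (l ≤ n - 1 - l) := by omega
    simp [this]
  | succ k ih =>
    intro g n l hk
    by_cases hle : l ≤ n - 1 - l
    · have e1 : n - 1 - l + 1 = n - l := by ring
      have e3 : l + 1 - 1 = l := by ring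
      by_cases hc : l + 1 ≤ n - 1 - l
      · have hc' : l ≤ n - 1 - l - 1 := by omega
        rw [pvLoopA, applyRings]
        simp only [hle, hc, and_self, if_true, dif_pos, if_pos hc',
          foldl_pair_append, e1, e3, List.nil_append]
        rw [show n - 1 - l - 1 = n - 1 - (l + 1) from by ring]
        rw [ih _ n (l + 1) (by omega)]
        congr 1
        rw [show n - 1 - (l + 1) = n - 2 - l from by ring]
        simp only [stepRing, ringCoords, if_pos hc, List.map_append, List.map_map,
          Function.comp_def, List.append_assoc]
      · have hn : n = 2 * l + 1 := by omega
        subst hn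
        have hε : 2 * l + 1 - 1 - l = l := by ring
        have hε2 : 2 * l + 1 - 1 - l - 1 = l - 1 := by ring
        have hε3 : (2:Int) * l + 1 - l = l + 1 := by ring
        rw [pvLoopA, dif_pos (show l ≤ 2 * l + 1 - 1 - l ∧ l ≤ 2 * l + 1 - 1 - l from ⟨hle, hle⟩)]
        simp only [hε, e3, if_neg (show ¬ (l + 1 ≤ l) by omega),
          if_neg (show ¬ (l ≤ l - 1) by omega), foldl_pair_append, List.nil_append,
          PySem.List.pyRange_one_eq_nil (le_refl (l + 1)), List.map_nil, List.append_nil]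
        rw [pvLoopA, dif_neg (show ¬ ((l + 1 ≤ l) ∧ (l ≤ l - 1)) by omega)]
        rw [applyRings, if_pos hle, applyRings,
          if_neg (show ¬ (l + 1 ≤ 2 * l + 1 - 1 - (l + 1)) by omega)]
        simp only [stepRing, ringCoords, List.map_map, Function.comp_def, hε, hε3,
          PySem.List.pyRange_one_eq_nil (le_refl (l + 1)), List.map_nil, List.append_nil,
          if_neg (show ¬ (l + 1 ≤ l) by omega)]
    · rw [pvLoopA, applyRings]
      simp [hle]

theorem loopA_eq_applyRings (g : List (List Int)) (n l : Int) :
    pvLoopA g l (n - 1 - l) l (n - 1 - l) = applyRings g n l :=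
  loopA_aux (n - 2 * l).toNat g n l le_rfl

-- distributing a list of items into buckets by an in-range index function
theorem foldl_set_bucket {α T : Type} (idx : α → Int) (val : α → T) :
    ∀ (xs : List α) (bs : List (List T)),
      (∀ x ∈ xs, 0 ≤ idx x ∧ (idx x).toNat < bs.length) →
      ∀ (k : Nat) (hk : k < bs.length),
        ∃ (hk' : k < (xs.foldl (fun bs x =>
            bs.set (idx x).toNat (PySem.List.pyGetD bs (idx x) [] ++ [val x])) bs).length),
        (xs.foldl (fun bs x =>
            bs.set (idx x).toNat (PySem.List.pyGetD bs (idx x) [] ++ [val x])) bs)[k]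
          = bs[k] ++ (xs.filter (fun x => idx x = (k : Int))).map val := by
  intro xs
  induction xs with
  | nil => intro bs _ k hk; exact ⟨hk, by simp⟩
  | cons x xs ih =>
    intro bs hin k hk
    have hx := hin x (List.mem_cons_self ..)
    have hlen : (bs.set (idx x).toNat (PySem.List.pyGetD bs (idx x) [] ++ [val x])).length
        = bs.length := by simp
    obtain ⟨hk', heq⟩ := ih (bs.set (idx x).toNat (PySem.List.pyGetD bs (idx x) [] ++ [val x]))
      (fun y hy => by rw [hlen]; exact hin y (List.mem_cons_of_mem _ hy)) k (by omega)
    refine ⟨by simpa using hk', ?_⟩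
    have hread : PySem.List.pyGetD bs (idx x) [] = bs[(idx x).toNat]'(hx.2) := by
      rw [PySem.List.pyGetD_of_nonneg _ _ hx.1, List.getD_eq_getElem _ _ hx.2]
    simp only [List.foldl_cons]
    rw [heq]
    simp only [hread, List.getElem_set, List.filter_cons]
    by_cases he : (idx x).toNat = k
    · have : idx x = (k : Int) := by omega
      simp [this, List.append_assoc]
    · have : ¬ (idx x = (k : Int)) := by omega
      simp [he, this]

theorem proj_spiralCells (n l : Int) :
    (spiralCells n l).map (fun c => (c.2.1, c.2.2)) = ringCoords n l := by
  simp only [spiralCells, ringCoords, List.map_append, List.map_map, Function.comp_def,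
    apply_ite (List.map (fun c : Int × Int × Int => (c.2.1, c.2.2))), List.map_nil]

theorem ring_cond_iff (n l : Int) (_h0 : 0 ≤ l) :
    l ≤ n - 1 - l ↔ l + 1 ≤ PySem.Int.floordiv (n + 1) 2 := by
  rw [PySem.Int.le_floordiv_iff_mul_le (by omega)]
  omega

theorem applyRings_eq_fold : ∀ (k : Nat) (g : List (List Int)) (n l : Int), (n - 2 * l).toNat ≤ k → 0 ≤ l →
    applyRings g n l
      = (PySem.List.pyRange l (PySem.Int.floordiv (n + 1) 2) 1).foldl
          (fun g l => stepRing g (ringCoords n l)) g := by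
  intro k
  induction k with
  | zero =>
    intro g n l hk h0
    rw [applyRings, if_neg (by omega), PySem.List.pyRange_one_eq_nil, List.foldl_nil]
    rw [← not_lt]
    intro hlt
    have := (ring_cond_iff n l h0).mpr hlt
    omega
  | succ k ih =>
    intro g n l hk h0
    by_cases hle : l ≤ n - 1 - l
    · rw [applyRings, if_pos hle,
        PySem.List.pyRange_one_cons (by exact_mod_cast (ring_cond_iff n l h0).mp hle : l < _),
        List.foldl_cons]
      exact ih _ n (l + 1) (by omega) (by omega)
    · rw [applyRings, if_neg hle, PySem.List.pyRange_one_eq_nil, List.foldl_nil]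
      rw [← not_lt]
      intro hlt
      have := (ring_cond_iff n l h0).mpr hlt
      omega

theorem sorted_rowMajorCells (n l : Int) (h0 : 0 ≤ l) (h1 : 2 * l ≤ n - 1) :
    PySem.List.sorted (rowMajorCells n l) (fun c => c.1) false = spiralCells n l := by
  have hnd : (spiralCells n l).Nodup := by
    have := (pairwise_spiralCells n l).imp
      (fun {a b} (h : a.1 < b.1) => (fun hab => absurd (congrArg Prod.fst hab) (ne_of_lt h) : a ≠ b))
    exact this
  have hp : (spiralCells n l).Perm (rowMajorCells n l) :=
    (List.perm_ext_iff_of_nodup hnd (nodup_rowMajorCells n l)).mpr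
      (fun c => by rw [mem_spiralCells n l h0 h1, mem_rowMajorCells])
  exact PySem.List.sorted_eq_of_perm_of_pairwise_lt _ _ _ hp (pairwise_spiralCells n l)

theorem buckets_eq (n : Int) :
    (PySem.List.pyRange 0 n 1).foldl (fun bs i =>
        (PySem.List.pyRange 0 n 1).foldl (fun bs j =>
          bs.set (pvLayer n i j).toNat
            (PySem.List.pyGetD bs (pvLayer n i j) [] ++ [(pvRank n (pvLayer n i j) i j, i, j)])) bs)
      (List.map (fun _ => ([] : List (Int × Int × Int)))
        (PySem.List.pyRange 0 (PySem.Int.floordiv (n + 1) 2) 1))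
    = List.map (fun l => rowMajorCells n l)
        (PySem.List.pyRange 0 (PySem.Int.floordiv (n + 1) 2) 1) := by
  have hsingle :
      ((PySem.List.pyRange 0 n 1).flatMap (fun i =>
          (PySem.List.pyRange 0 n 1).map (fun j => (i, j)))).foldl
        (fun bs (p : Int × Int) =>
          bs.set (pvLayer n p.1 p.2).toNat
            (PySem.List.pyGetD bs (pvLayer n p.1 p.2) []
              ++ [(pvRank n (pvLayer n p.1 p.2) p.1 p.2, p.1, p.2)]))
        (List.map (fun _ => ([] : List (Int × Int × Int)))
          (PySem.List.pyRange 0 (PySem.Int.floordiv (n + 1) 2) 1))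
      = (PySem.List.pyRange 0 n 1).foldl (fun bs i =>
          (PySem.List.pyRange 0 n 1).foldl (fun bs j =>
            bs.set (pvLayer n i j).toNat
              (PySem.List.pyGetD bs (pvLayer n i j) [] ++ [(pvRank n (pvLayer n i j) i j, i, j)])) bs)
        (List.map (fun _ => ([] : List (Int × Int × Int)))
          (PySem.List.pyRange 0 (PySem.Int.floordiv (n + 1) 2) 1)) := by
    rw [List.foldl_flatMap]
    simp only [List.foldl_map]
  rw [← hsingle]
  have hcond : ∀ p ∈ (PySem.List.pyRange 0 n 1).flatMap (fun i =>
      (PySem.List.pyRange 0 n 1).map (fun j => (i, j))),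
      0 ≤ pvLayer n p.1 p.2 ∧ (pvLayer n p.1 p.2).toNat
        < (List.map (fun _ => ([] : List (Int × Int × Int)))
            (PySem.List.pyRange 0 (PySem.Int.floordiv (n + 1) 2) 1)).length := by
    intro p hp
    simp only [List.mem_flatMap, List.mem_map, PySem.List.mem_pyRange_one] at hp
    obtain ⟨i, hi, j, hj, rfl⟩ := hp
    have hl0 : 0 ≤ pvLayer n i j := by simp only [pvLayer, le_min_iff]; omega
    have hle : pvLayer n i j ≤ n - 1 - pvLayer n i j := by
      simp only [pvLayer]; omega
    have hK := (ring_cond_iff n _ hl0).mp hle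
    simp only [List.length_map, PySem.List.length_pyRange_one, sub_zero]
    exact ⟨hl0, by omega⟩
  -- the fold distributes each cell into its layer's bucket
  have hlen : ∀ (xs : List (Int × Int)) (bs : List (List (Int × Int × Int))),
      (xs.foldl (fun bs (p : Int × Int) =>
        bs.set (pvLayer n p.1 p.2).toNat
          (PySem.List.pyGetD bs (pvLayer n p.1 p.2) []
            ++ [(pvRank n (pvLayer n p.1 p.2) p.1 p.2, p.1, p.2)])) bs).length = bs.length := by
    intro xs
    induction xs with
    | nil => intro bs; rfl
    | cons x xs ih => intro bs; rw [List.foldl_cons, ih]; simp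
  apply List.ext_getElem
  · simp only [hlen, List.length_map]
  · intro k hk1 hk2
    obtain ⟨hk', heq⟩ := foldl_set_bucket (fun (p : Int × Int) => pvLayer n p.1 p.2)
      (fun (p : Int × Int) => (pvRank n (pvLayer n p.1 p.2) p.1 p.2, p.1, p.2))
      ((PySem.List.pyRange 0 n 1).flatMap (fun i =>
        (PySem.List.pyRange 0 n 1).map (fun j => (i, j))))
      (List.map (fun _ => ([] : List (Int × Int × Int)))
        (PySem.List.pyRange 0 (PySem.Int.floordiv (n + 1) 2) 1))
      hcond k (by simpa [hlen] using hk1)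
    rw [heq]
    simp only [List.getElem_map, List.nil_append, PySem.List.getElem_pyRange_one, zero_add]
    rw [List.filter_flatMap, List.map_flatMap, rowMajorCells]
    apply List.flatMap_congr
    intro i _
    rw [List.filter_map, List.map_map]
    apply List.map_congr_left
    intro j hj
    simp only [List.mem_filter, Function.comp_def, decide_eq_true_eq] at hj
    simp only [Function.comp_def, hj.2]

theorem alt_eq_fold (grids : List (List Int)) :
    BoarderSort_alt grids
      = (PySem.List.pyRange 0 (PySem.Int.floordiv ((grids.length : Int) + 1) 2) 1).foldl
          (fun g l => stepRing g (ringCoords (grids.length : Int) l)) grids := by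
  simp only [BoarderSort_alt]
  have hdouble :
      (List.foldl
        (fun bs i =>
          List.foldl
            (fun bs j =>
              bs.set (pvLayer (grids.length : Int) i j).toNat
                (PySem.List.pyGetD bs (pvLayer (grids.length : Int) i j) [] ++
                  [(pvRank (grids.length : Int) (pvLayer (grids.length : Int) i j) i j, i, j)]))
            bs (PySem.List.pyRange 0 (grids.length : Int) 1))
        (List.map (fun _ => ([] : List (Int × Int × Int)))
          (PySem.List.pyRange 0 (PySem.Int.floordiv ((grids.length : Int) + 1) 2) 1))
        (PySem.List.pyRange 0 (grids.length : Int) 1))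
      = List.map (fun l => rowMajorCells (grids.length : Int) l)
          (PySem.List.pyRange 0 (PySem.Int.floordiv ((grids.length : Int) + 1) 2) 1) :=
    buckets_eq (grids.length : Int)
  rw [hdouble, List.foldl_map]
  refine PySem.List.foldl_congr_mem _ _ _ _ ?_
  intro g l hl
  rw [PySem.List.mem_pyRange_one] at hl
  have h1 : 2 * l ≤ (grids.length : Int) - 1 := by
    have := (ring_cond_iff (grids.length : Int) l hl.1).mpr (by omega)
    omega
  rw [sorted_rowMajorCells _ _ hl.1 h1]
  have hm : (spiralCells (grids.length : Int) l).map (fun c => pvGet2 g c.2.1 c.2.2)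
      = (ringCoords (grids.length : Int) l).map (fun p => pvGet2 g p.1 p.2) := by
    rw [← proj_spiralCells, List.map_map]; rfl
  rw [hm, stepRing, ← proj_spiralCells, List.zip_map_left, List.foldl_map]
  simp only [Prod.map_fst, Prod.map_snd, id_eq]

theorem BoarderSort_spec : Claim_equal_BoarderSort := by
  intro grids _ _
  unfold Spec_BoarderSort BoarderSort
  have h := loopA_eq_applyRings grids (grids.length : Int) 0
  simp only [sub_zero] at h
  rw [h, applyRings_eq_fold ((grids.length : Int)).toNat _ _ 0 (by omega) le_rfl, alt_eq_fold]
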